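-- pv_equiv track=rewrite | github.com/hdlldh/leetcode_python | leetcode/editor/en/[321]Create Maximum Number.py | mergNum
-- ===== SOURCE A (Python) =====
-- def mergNum(nums1, nums2):
--     n1 = len(nums1)
--     n2 = len(nums2)
--     i = j = 0
--     ans = []
--     while i< n1 and j<n2:
--         if nums1[i:] >= nums2[j:]:
--             ans.append(nums1[i])
--             i += 1
--         else:
--             ans.append(nums2[j])
--             j += 1
--     while i<n1:
--         ans.append(nums1[i])
--         i += 1
--     while j<n2:
--         ans.append(nums2[j])
--         j += 1
--     return ans
-- ===== SOURCE B (Python) =====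
-- def mergNum(nums1, nums2):
--     n1, n2 = len(nums1), len(nums2)
--     # Dynamic programming: ge[i][j] == (nums1[i:] >= nums2[j:]), filled back-to-front,
--     # so the merge loop does O(1) comparisons instead of repeated slice comparisons.
--     ge = [[False] * (n2 + 1) for _ in range(n1 + 1)]
--     for i in range(n1 + 1):
--         ge[i][n2] = True
--     for i in range(n1 - 1, -1, -1):
--         a = nums1[i]
--         row, nxt = ge[i], ge[i + 1]
--         for j in range(n2 - 1, -1, -1):
--             b = nums2[j]
--             row[j] = a > b or (a == b and nxt[j + 1])
--     out = []
--     i = j = 0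
--     while i < n1 and j < n2:
--         if ge[i][j]:
--             out.append(nums1[i])
--             i += 1
--         else:
--             out.append(nums2[j])
--             j += 1
--     out.extend(nums1[i:])
--     out.extend(nums2[j:])
--     return out
-- ===== Notes on version B (the rewrite author's own statement) =====
-- stated objective: alternative
-- what changed: Replaces A's per-iteration Python slice creation and lexicographic slice comparison with a dynamic-programming table ge[i][j] = (nums1[i:] >= nums2[j:]) filled back-to-front once, so the merge loop does O(1) lookups.
import Mathlib
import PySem

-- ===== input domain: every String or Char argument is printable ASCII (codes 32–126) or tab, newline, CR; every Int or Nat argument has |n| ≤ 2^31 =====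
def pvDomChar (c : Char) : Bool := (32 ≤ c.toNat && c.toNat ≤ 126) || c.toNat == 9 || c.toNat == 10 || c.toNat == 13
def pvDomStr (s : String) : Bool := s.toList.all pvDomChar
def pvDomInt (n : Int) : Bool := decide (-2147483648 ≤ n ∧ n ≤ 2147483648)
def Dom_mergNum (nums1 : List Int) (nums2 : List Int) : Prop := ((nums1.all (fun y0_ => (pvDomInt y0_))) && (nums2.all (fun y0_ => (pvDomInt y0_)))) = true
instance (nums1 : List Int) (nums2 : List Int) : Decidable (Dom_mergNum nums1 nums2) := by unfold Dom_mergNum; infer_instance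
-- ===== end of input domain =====

-- B replaces A's repeated Python slice comparisons by a back-to-front DP table of
-- suffix comparisons, so the merge loop looks each comparison up in O(1) (objective: alternative).

-- ===== PORT A =====
-- Python's list comparison `xs >= ys` on int lists, ported by hand step for step
-- (exact: lexicographic, shorter prefix is smaller).
def pyListGe : List Int → List Int → Bool
  | _, [] => true
  | [], _ :: _ => false
  | a :: as, b :: bs => if a > b then true else if a < b then false else pyListGe as bs

-- `while i < n: ans.append(xs[i]); i += 1` (the two trailing while loops of A);
-- the fuel argument only makes the loop structural: mergNumTail passes exactly the
-- number of remaining iterations, so the 0 case is never the one that stops the loop early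
def tailGo : Nat → List Int → Nat → List Int → List Int
  | 0, _, _, ans => ans
  | fuel + 1, xs, i, ans =>
      if i < xs.length then tailGo fuel xs (i + 1) (ans ++ [xs.getD i 0]) else ans

def mergNumTail (xs : List Int) (i : Nat) (ans : List Int) : List Int :=
  tailGo (xs.length - i) xs i ans

-- A's main while loop; `nums1[i:]` with 0 ≤ i is exactly `List.drop i`; fuel is a
-- totality guard (one unit per iteration), and on exhaustion we are past the loop
def loopGoA (nums1 nums2 : List Int) : Nat → Nat → Nat → List Int → List Int
  | 0, i, j, ans => mergNumTail nums2 j (mergNumTail nums1 i ans)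
  | fuel + 1, i, j, ans =>
      if i < nums1.length ∧ j < nums2.length then
        if pyListGe (nums1.drop i) (nums2.drop j) then
          loopGoA nums1 nums2 fuel (i + 1) j (ans ++ [nums1.getD i 0])
        else
          loopGoA nums1 nums2 fuel i (j + 1) (ans ++ [nums2.getD j 0])
      else
        mergNumTail nums2 j (mergNumTail nums1 i ans)

def mergNum (nums1 : List Int) (nums2 : List Int) : List Int :=
  loopGoA nums1 nums2 (nums1.length + nums2.length) 0 0 []

-- ===== PORT B =====
-- one DP row: row i of B's table from row i+1 (`nxt`); entry j is
-- `a > nums2[j] or (a == nums2[j] and nxt[j+1])`, last entry True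
def dpRow (a : Int) : List Int → List Bool → List Bool
  | [], _ => [true]
  | b :: bs, nxt =>
      (decide (a > b) || (decide (a = b) && nxt.tail.headD false)) :: dpRow a bs nxt.tail

-- B's table `ge`, rows i = 0..n1 built bottom-up; row n1 is [False]*n2 ++ [True]
def dpTable : List Int → List Int → List (List Bool)
  | [], nums2 => [List.replicate nums2.length false ++ [true]]
  | a :: as, nums2 => dpRow a nums2 ((dpTable as nums2).headD []) :: dpTable as nums2

-- B's merge loop: O(1) table lookups; the two `out.extend` calls are the drops;
-- fuel as in loopGoA (exactly the iteration count, exhaustion is past the loop)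
def loopGoB (nums1 nums2 : List Int) (ge : List (List Bool)) : Nat → Nat → Nat → List Int → List Int
  | 0, i, j, out => out ++ nums1.drop i ++ nums2.drop j
  | fuel + 1, i, j, out =>
      if i < nums1.length ∧ j < nums2.length then
        if (ge.getD i []).getD j false then
          loopGoB nums1 nums2 ge fuel (i + 1) j (out ++ [nums1.getD i 0])
        else
          loopGoB nums1 nums2 ge fuel i (j + 1) (out ++ [nums2.getD j 0])
      else
        out ++ nums1.drop i ++ nums2.drop j

def mergNum_alt (nums1 : List Int) (nums2 : List Int) : List Int :=
  loopGoB nums1 nums2 (dpTable nums1 nums2) (nums1.length + nums2.length) 0 0 []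

-- ===== PRECONDITION & SPEC =====
def Spec_mergNum (nums1 : List Int) (nums2 : List Int) (out : List Int) : Prop := out = mergNum_alt nums1 nums2
instance (nums1 : List Int) (nums2 : List Int) (out : List Int) : Decidable (Spec_mergNum nums1 nums2 out) := by unfold Spec_mergNum; infer_instance

-- ===== CLAIM (what is proved, stated in full; the proofs are below) =====
def Claim_equal_mergNum : Prop := ∀ (nums1 : List Int) (nums2 : List Int), Dom_mergNum nums1 nums2 → Spec_mergNum nums1 nums2 (mergNum nums1 nums2)

-- ===== LEMMAS AND PROOFS =====

-- the intended value of row i of the table: entry j is `nums1[i:] >= nums2[j:]`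
def rowOf (s1 : List Int) : List Int → List Bool
  | [] => [true]
  | b :: bs => pyListGe s1 (b :: bs) :: rowOf s1 bs

theorem pyListGe_nil (s1 : List Int) : pyListGe s1 [] = true := by
  cases s1 <;> rfl

theorem rowOf_headD (s1 s2 : List Int) : (rowOf s1 s2).headD false = pyListGe s1 s2 := by
  cases s2 with
  | nil => simp [rowOf, pyListGe_nil]
  | cons b bs => rfl

theorem rowOf_nil_left (s2 : List Int) :
    rowOf [] s2 = List.replicate s2.length false ++ [true] := by
  induction s2 with
  | nil => rfl
  | cons b bs ih => simp [rowOf, pyListGe, ih, List.replicate_succ]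

theorem dpRow_rowOf (a : Int) (s1 s2 : List Int) :
    dpRow a s2 (rowOf s1 s2) = rowOf (a :: s1) s2 := by
  induction s2 with
  | nil => rfl
  | cons b bs ih =>
      simp only [dpRow, rowOf, List.tail_cons, rowOf_headD, List.cons.injEq]
      refine ⟨?_, ?_⟩
      · show (decide (a > b) || (decide (a = b) && pyListGe s1 bs)) = pyListGe (a :: s1) (b :: bs)
        simp only [pyListGe]
        rcases lt_trichotomy a b with h | h | h
        · simp [h, not_lt.mpr (le_of_lt h), ne_of_lt h]
        · simp [h]
        · simp [h, (ne_of_gt h)]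
      · rw [← ih]

theorem dpTable_getD (s1 s2 : List Int) (i : Nat) (hi : i ≤ s1.length) :
    (dpTable s1 s2).getD i [] = rowOf (s1.drop i) s2 := by
  induction s1 generalizing i with
  | nil =>
      have : i = 0 := by simpa using hi
      subst this
      simp [dpTable, rowOf_nil_left]
  | cons a as ih =>
      cases i with
      | zero =>
          have h0 : (dpTable as s2).headD [] = rowOf as s2 := by
            have := ih 0 (Nat.zero_le _)
            cases hT : dpTable as s2 with
            | nil => rw [hT] at this; simp at this; simp [← this]
            | cons r rs => rw [hT] at this; simpa using this
          simp only [dpTable, List.drop_zero, List.getD]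
          simp only [List.getElem?_cons_zero, Option.getD_some]
          rw [h0, dpRow_rowOf]
      | succ i' =>
          simp only [dpTable, List.getD, List.getElem?_cons_succ, List.drop_succ_cons]
          exact ih i' (by simpa using hi)

theorem rowOf_getD (s1 s2 : List Int) (j : Nat) (hj : j ≤ s2.length) :
    (rowOf s1 s2).getD j false = pyListGe s1 (s2.drop j) := by
  induction s2 generalizing j with
  | nil =>
      have : j = 0 := by simpa using hj
      subst this
      simp [rowOf, pyListGe_nil]
  | cons b bs ih =>
      cases j with
      | zero => rfl
      | succ j' =>
          simp only [rowOf, List.getD, List.getElem?_cons_succ, List.drop_succ_cons]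
          exact ih j' (by simpa using hj)

theorem lookup_eq (nums1 nums2 : List Int) (i j : Nat)
    (hi : i < nums1.length) (hj : j < nums2.length) :
    ((dpTable nums1 nums2).getD i []).getD j false
      = pyListGe (nums1.drop i) (nums2.drop j) := by
  rw [dpTable_getD nums1 nums2 i (le_of_lt hi), rowOf_getD _ _ j (le_of_lt hj)]

theorem tailGo_eq_drop (fuel : Nat) (xs : List Int) (i : Nat) (ans : List Int)
    (hf : xs.length - i ≤ fuel) : tailGo fuel xs i ans = ans ++ xs.drop i := by
  induction fuel generalizing i ans with
  | zero =>
      rw [tailGo, List.drop_eq_nil_of_le (by omega), List.append_nil]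
  | succ fuel ih =>
      rw [tailGo]
      by_cases h : i < xs.length
      · rw [if_pos h, ih (i + 1) _ (by omega), List.drop_eq_getElem_cons h]
        simp [List.getD, List.getElem?_eq_getElem h]
      · rw [if_neg h, List.drop_eq_nil_of_le (by omega), List.append_nil]

theorem mergNumTail_eq_drop (xs : List Int) (i : Nat) (ans : List Int) :
    mergNumTail xs i ans = ans ++ xs.drop i :=
  tailGo_eq_drop _ xs i ans (Nat.le_refl _)

theorem loops_eq (nums1 nums2 : List Int) (fuel : Nat) (i j : Nat) (ans : List Int) :
    loopGoA nums1 nums2 fuel i j ans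
      = loopGoB nums1 nums2 (dpTable nums1 nums2) fuel i j ans := by
  induction fuel generalizing i j ans with
  | zero =>
      rw [loopGoA, loopGoB, mergNumTail_eq_drop, mergNumTail_eq_drop, List.append_assoc]
  | succ fuel ih =>
      rw [loopGoA, loopGoB]
      by_cases h : i < nums1.length ∧ j < nums2.length
      · rw [if_pos h, if_pos h, lookup_eq nums1 nums2 i j h.1 h.2]
        by_cases hc : pyListGe (nums1.drop i) (nums2.drop j) = true
        · rw [if_pos hc, if_pos hc, ih]
        · rw [if_neg hc, if_neg hc, ih]
      · rw [if_neg h, if_neg h, mergNumTail_eq_drop, mergNumTail_eq_drop, List.append_assoc]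

-- ===== VERDICT (by name: the statement is the Claim_ definition above) =====
theorem mergNum_spec : Claim_equal_mergNum := by
  intro nums1 nums2 _
  show mergNum nums1 nums2 = mergNum_alt nums1 nums2
  exact loops_eq nums1 nums2 (nums1.length + nums2.length) 0 0 []
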